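-- pv_equiv track=rewrite | github.com/justinhartfield/protein-empire | apps/highprotein.recipes/generators/generate_meal_plan_pdf.py | generate_shopping_list
-- ===== SOURCE A (Python) =====
-- def generate_shopping_list(recipes):
--     """Combine all ingredients into a categorized shopping list"""
--     all_ingredients = []
--     for recipe in recipes:
--         all_ingredients.extend(recipe.get("ingredients", []))
--
--     # Categorize ingredients
--     categories = {
--         "Proteins & Meats": [],
--         "Dairy & Eggs": [],
--         "Grains & Flours": [],
--         "Produce": [],
--         "Pantry Staples": [],
--         "Other": []
--     }
--
--     for ing in all_ingredients:
--         ing_lower = ing.lower()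
--         if any(x in ing_lower for x in ["egg", "turkey", "sausage", "chicken", "protein powder", "whey", "tempeh", "tofu"]):
--             categories["Proteins & Meats"].append(ing)
--         elif any(x in ing_lower for x in ["milk", "yogurt", "cheese", "cottage", "ricotta", "cream"]):
--             categories["Dairy & Eggs"].append(ing)
--         elif any(x in ing_lower for x in ["oat", "flour", "tortilla", "bread", "rice", "quinoa"]):
--             categories["Grains & Flours"].append(ing)
--         elif any(x in ing_lower for x in ["pepper", "onion", "spinach", "tomato", "avocado", "banana", "berry", "fruit", "vegetable"]):
--             categories["Produce"].append(ing)
--         elif any(x in ing_lower for x in ["salt", "pepper", "spice", "cinnamon", "vanilla", "maple", "honey", "oil", "baking"]):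
--             categories["Pantry Staples"].append(ing)
--         else:
--             categories["Other"].append(ing)
--
--     # Remove duplicates (case-insensitive)
--     for cat in categories:
--         seen = set()
--         unique = []
--         for ing in categories[cat]:
--             key = ing.lower().strip()
--             if key not in seen:
--                 seen.add(key)
--                 unique.append(ing)
--         categories[cat] = unique
--
--     return categories
-- ===== SOURCE B (Python) =====
-- CATEGORY_KEYWORDS = [
--     ("Proteins & Meats", ["egg", "turkey", "sausage", "chicken", "protein powder", "whey", "tempeh", "tofu"]),
--     ("Dairy & Eggs", ["milk", "yogurt", "cheese", "cottage", "ricotta", "cream"]),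
--     ("Grains & Flours", ["oat", "flour", "tortilla", "bread", "rice", "quinoa"]),
--     ("Produce", ["pepper", "onion", "spinach", "tomato", "avocado", "banana", "berry", "fruit", "vegetable"]),
--     ("Pantry Staples", ["salt", "pepper", "spice", "cinnamon", "vanilla", "maple", "honey", "oil", "baking"]),
-- ]
--
--
-- def _category_of(ing):
--     low = ing.lower()
--     for name, keywords in CATEGORY_KEYWORDS:
--         if any(k in low for k in keywords):
--             return name
--     return "Other"
--
--
-- def _dedup(items):
--     firsts = {}
--     for ing in items:
--         firsts.setdefault(ing.lower().strip(), ing)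
--     return list(firsts.values())
--
--
-- def generate_shopping_list(recipes):
--     flat = [ing for recipe in recipes for ing in recipe.get("ingredients", [])]
--     names = [name for name, _ in CATEGORY_KEYWORDS] + ["Other"]
--     return {name: _dedup([ing for ing in flat if _category_of(ing) == name])
--             for name in names}
-- ===== Notes on version B (the rewrite author's own statement) =====
-- stated objective: alternative
-- what changed: Replaces A's single dispatch loop into mutable dict buckets followed by a per-bucket seen-set dedup loop with a table-driven design: a (name, keywords) table, a category_of helper, and a dict comprehension that builds each category by filtering the flattened list and deduping via dict.setdefault on the lowercased-stripped key.
import Mathlib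
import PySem

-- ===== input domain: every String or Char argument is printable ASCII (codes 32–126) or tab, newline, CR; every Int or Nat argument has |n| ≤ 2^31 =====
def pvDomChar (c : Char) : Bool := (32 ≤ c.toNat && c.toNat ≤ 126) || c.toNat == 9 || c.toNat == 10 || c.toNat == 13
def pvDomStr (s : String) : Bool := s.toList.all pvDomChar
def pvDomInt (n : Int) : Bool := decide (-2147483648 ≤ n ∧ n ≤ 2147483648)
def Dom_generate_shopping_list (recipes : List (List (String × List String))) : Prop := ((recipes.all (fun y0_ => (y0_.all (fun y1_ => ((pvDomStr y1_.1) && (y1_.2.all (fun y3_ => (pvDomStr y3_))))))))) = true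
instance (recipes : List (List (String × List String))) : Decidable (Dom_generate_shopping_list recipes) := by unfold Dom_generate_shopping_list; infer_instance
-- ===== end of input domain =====

-- B replaces A's dispatch-into-mutable-buckets loop + per-bucket seen-set dedup with a
-- table-driven category_of helper, six filter passes and a setdefault-dict dedup (alternative decomposition, same cost).

-- ===== PORT A =====
-- A's keyword lists and the `any(x in ing_lower for x in …)` test
def pvKwProteins : List String := ["egg", "turkey", "sausage", "chicken", "protein powder", "whey", "tempeh", "tofu"]
def pvKwDairy : List String := ["milk", "yogurt", "cheese", "cottage", "ricotta", "cream"]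
def pvKwGrains : List String := ["oat", "flour", "tortilla", "bread", "rice", "quinoa"]
def pvKwProduce : List String := ["pepper", "onion", "spinach", "tomato", "avocado", "banana", "berry", "fruit", "vegetable"]
def pvKwPantry : List String := ["salt", "pepper", "spice", "cinnamon", "vanilla", "maple", "honey", "oil", "baking"]

def pvAnyIn (kws : List String) (s : String) : Bool := kws.any (fun x => PySem.Str.isIn x s)

-- body of A's categorizing for-loop (the if/elif chain; list.append = modify with ++ [ing])
def pvStepCat (d : PySem.Dict String (List String)) (ing : String) : PySem.Dict String (List String) :=
  let ing_lower := PySem.Str.lower ing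
  if pvAnyIn pvKwProteins ing_lower then d.modify "Proteins & Meats" [] (· ++ [ing])
  else if pvAnyIn pvKwDairy ing_lower then d.modify "Dairy & Eggs" [] (· ++ [ing])
  else if pvAnyIn pvKwGrains ing_lower then d.modify "Grains & Flours" [] (· ++ [ing])
  else if pvAnyIn pvKwProduce ing_lower then d.modify "Produce" [] (· ++ [ing])
  else if pvAnyIn pvKwPantry ing_lower then d.modify "Pantry Staples" [] (· ++ [ing])
  else d.modify "Other" [] (· ++ [ing])

-- body of A's per-category dedup loop (seen : set, unique : list)
def pvStepSeen (p : PySem.Set String × List String) (ing : String) : PySem.Set String × List String :=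
  let key := PySem.Str.strip (PySem.Str.lower ing)
  if PySem.Set.contains p.1 key then p else (PySem.Set.add p.1 key, p.2 ++ [ing])

def generate_shopping_list (recipes : List (List (String × List String))) : List (String × List String) :=
  let all_ingredients := recipes.foldl (fun acc recipe => acc ++ (PySem.Dict.mk recipe).getD "ingredients" []) []
  let categories : PySem.Dict String (List String) :=
    PySem.Dict.mk [("Proteins & Meats", []), ("Dairy & Eggs", []), ("Grains & Flours", []),
                   ("Produce", []), ("Pantry Staples", []), ("Other", [])]
  let categories := all_ingredients.foldl pvStepCat categories
  let categories := categories.keys.foldl (fun d cat =>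
      let su := (d.getD cat []).foldl pvStepSeen (PySem.Set.empty, [])
      d.insert cat su.2) categories
  categories.items

-- ===== PORT B =====
def pvTable : List (String × List String) :=
  [("Proteins & Meats", ["egg", "turkey", "sausage", "chicken", "protein powder", "whey", "tempeh", "tofu"]),
   ("Dairy & Eggs", ["milk", "yogurt", "cheese", "cottage", "ricotta", "cream"]),
   ("Grains & Flours", ["oat", "flour", "tortilla", "bread", "rice", "quinoa"]),
   ("Produce", ["pepper", "onion", "spinach", "tomato", "avocado", "banana", "berry", "fruit", "vegetable"]),
   ("Pantry Staples", ["salt", "pepper", "spice", "cinnamon", "vanilla", "maple", "honey", "oil", "baking"])]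

-- _category_of: first table row with a keyword hit, else "Other"
def pvCategoryOf (ing : String) : String :=
  let low := PySem.Str.lower ing
  match pvTable.find? (fun p => p.2.any (fun k => PySem.Str.isIn k low)) with
  | some p => p.1
  | none => "Other"

-- _dedup: first occurrence per lower().strip() key, via dict.setdefault then .values()
def pvDedup (items : List String) : List String :=
  (items.foldl (fun d ing => d.setdefault (PySem.Str.strip (PySem.Str.lower ing)) ing)
    (PySem.Dict.mk ([] : List (String × String)))).values

def generate_shopping_list_alt (recipes : List (List (String × List String))) : List (String × List String) :=
  let flat := recipes.flatMap (fun recipe => (PySem.Dict.mk recipe).getD "ingredients" [])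
  let names := pvTable.map (·.1) ++ ["Other"]
  names.map (fun name => (name, pvDedup (flat.filter (fun ing => pvCategoryOf ing == name))))

-- ===== PRECONDITION & SPEC =====
def Spec_generate_shopping_list (recipes : List (List (String × List String))) (out : List (String × List String)) : Prop := out = generate_shopping_list_alt recipes
instance (recipes : List (List (String × List String))) (out : List (String × List String)) : Decidable (Spec_generate_shopping_list recipes out) := by unfold Spec_generate_shopping_list; infer_instance

-- ===== CLAIM (what is proved, stated in full; the proofs are below) =====
def Claim_equal_generate_shopping_list : Prop := ∀ (recipes : List (List (String × List String))), Dom_generate_shopping_list recipes → Spec_generate_shopping_list recipes (generate_shopping_list recipes)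

-- ===== LEMMAS AND PROOFS =====

-- the category A's if/elif chain selects for an ingredient
def catA (ing : String) : String :=
  let l := PySem.Str.lower ing
  if pvAnyIn pvKwProteins l then "Proteins & Meats"
  else if pvAnyIn pvKwDairy l then "Dairy & Eggs"
  else if pvAnyIn pvKwGrains l then "Grains & Flours"
  else if pvAnyIn pvKwProduce l then "Produce"
  else if pvAnyIn pvKwPantry l then "Pantry Staples"
  else "Other"

lemma catA_eq_categoryOf (ing : String) : catA ing = pvCategoryOf ing := by
  unfold pvCategoryOf pvTable
  simp only [List.find?]
  rw [show ((["egg", "turkey", "sausage", "chicken", "protein powder", "whey", "tempeh", "tofu"] : List String).any fun k => PySem.Str.isIn k (PySem.Str.lower ing)) = pvAnyIn pvKwProteins (PySem.Str.lower ing) from rfl]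
  rw [show ((["milk", "yogurt", "cheese", "cottage", "ricotta", "cream"] : List String).any fun k => PySem.Str.isIn k (PySem.Str.lower ing)) = pvAnyIn pvKwDairy (PySem.Str.lower ing) from rfl]
  rw [show ((["oat", "flour", "tortilla", "bread", "rice", "quinoa"] : List String).any fun k => PySem.Str.isIn k (PySem.Str.lower ing)) = pvAnyIn pvKwGrains (PySem.Str.lower ing) from rfl]
  rw [show ((["pepper", "onion", "spinach", "tomato", "avocado", "banana", "berry", "fruit", "vegetable"] : List String).any fun k => PySem.Str.isIn k (PySem.Str.lower ing)) = pvAnyIn pvKwProduce (PySem.Str.lower ing) from rfl]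
  rw [show ((["salt", "pepper", "spice", "cinnamon", "vanilla", "maple", "honey", "oil", "baking"] : List String).any fun k => PySem.Str.isIn k (PySem.Str.lower ing)) = pvAnyIn pvKwPantry (PySem.Str.lower ing) from rfl]
  cases h1 : pvAnyIn pvKwProteins (PySem.Str.lower ing) <;>
  cases h2 : pvAnyIn pvKwDairy (PySem.Str.lower ing) <;>
  cases h3 : pvAnyIn pvKwGrains (PySem.Str.lower ing) <;>
  cases h4 : pvAnyIn pvKwProduce (PySem.Str.lower ing) <;>
  cases h5 : pvAnyIn pvKwPantry (PySem.Str.lower ing) <;>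
  simp [catA, h1, h2, h3, h4, h5]


lemma flatten_eq (recipes : List (List (String × List String))) :
    recipes.foldl (fun acc recipe => acc ++ (PySem.Dict.mk recipe).getD "ingredients" []) [] =
    recipes.flatMap (fun recipe => (PySem.Dict.mk recipe).getD "ingredients" []) := by
  simpa using PySem.List.foldl_append_eq_flatMap
    (fun recipe => (PySem.Dict.mk recipe).getD "ingredients" []) recipes []

lemma cat_loop (l : List String) (a b c d e f : List String) :
    l.foldl pvStepCat (PySem.Dict.mk [("Proteins & Meats", a), ("Dairy & Eggs", b), ("Grains & Flours", c),
                   ("Produce", d), ("Pantry Staples", e), ("Other", f)]) =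
    PySem.Dict.mk [("Proteins & Meats", a ++ l.filter (fun i => catA i == "Proteins & Meats")),
                   ("Dairy & Eggs", b ++ l.filter (fun i => catA i == "Dairy & Eggs")),
                   ("Grains & Flours", c ++ l.filter (fun i => catA i == "Grains & Flours")),
                   ("Produce", d ++ l.filter (fun i => catA i == "Produce")),
                   ("Pantry Staples", e ++ l.filter (fun i => catA i == "Pantry Staples")),
                   ("Other", f ++ l.filter (fun i => catA i == "Other"))] := by
  induction l generalizing a b c d e f with
  | nil => simp
  | cons i l ih =>
    rw [List.foldl_cons]
    show l.foldl pvStepCat (pvStepCat _ i) = _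
    rw [pvStepCat]
    split_ifs with h1 h2 h3 h4 h5 <;>
      [rw [show ∀ g, (PySem.Dict.mk [("Proteins & Meats", a), ("Dairy & Eggs", b), ("Grains & Flours", c), ("Produce", d), ("Pantry Staples", e), ("Other", f)]).modify "Proteins & Meats" [] g = PySem.Dict.mk [("Proteins & Meats", g a), ("Dairy & Eggs", b), ("Grains & Flours", c), ("Produce", d), ("Pantry Staples", e), ("Other", f)] from fun _ => rfl, ih];
       rw [show ∀ g, (PySem.Dict.mk [("Proteins & Meats", a), ("Dairy & Eggs", b), ("Grains & Flours", c), ("Produce", d), ("Pantry Staples", e), ("Other", f)]).modify "Dairy & Eggs" [] g = PySem.Dict.mk [("Proteins & Meats", a), ("Dairy & Eggs", g b), ("Grains & Flours", c), ("Produce", d), ("Pantry Staples", e), ("Other", f)] from fun _ => rfl, ih];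
       rw [show ∀ g, (PySem.Dict.mk [("Proteins & Meats", a), ("Dairy & Eggs", b), ("Grains & Flours", c), ("Produce", d), ("Pantry Staples", e), ("Other", f)]).modify "Grains & Flours" [] g = PySem.Dict.mk [("Proteins & Meats", a), ("Dairy & Eggs", b), ("Grains & Flours", g c), ("Produce", d), ("Pantry Staples", e), ("Other", f)] from fun _ => rfl, ih];
       rw [show ∀ g, (PySem.Dict.mk [("Proteins & Meats", a), ("Dairy & Eggs", b), ("Grains & Flours", c), ("Produce", d), ("Pantry Staples", e), ("Other", f)]).modify "Produce" [] g = PySem.Dict.mk [("Proteins & Meats", a), ("Dairy & Eggs", b), ("Grains & Flours", c), ("Produce", g d), ("Pantry Staples", e), ("Other", f)] from fun _ => rfl, ih];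
       rw [show ∀ g, (PySem.Dict.mk [("Proteins & Meats", a), ("Dairy & Eggs", b), ("Grains & Flours", c), ("Produce", d), ("Pantry Staples", e), ("Other", f)]).modify "Pantry Staples" [] g = PySem.Dict.mk [("Proteins & Meats", a), ("Dairy & Eggs", b), ("Grains & Flours", c), ("Produce", d), ("Pantry Staples", g e), ("Other", f)] from fun _ => rfl, ih];
       rw [show ∀ g, (PySem.Dict.mk [("Proteins & Meats", a), ("Dairy & Eggs", b), ("Grains & Flours", c), ("Produce", d), ("Pantry Staples", e), ("Other", f)]).modify "Other" [] g = PySem.Dict.mk [("Proteins & Meats", a), ("Dairy & Eggs", b), ("Grains & Flours", c), ("Produce", d), ("Pantry Staples", e), ("Other", g f)] from fun _ => rfl, ih]] <;>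
    simp [List.filter_cons, catA, h1] <;> simp_all

lemma dedup_loop (l : List String) (d : PySem.Dict String String) :
    (l.foldl pvStepSeen (d.keys, d.values)).2 =
    (l.foldl (fun d ing => d.setdefault (PySem.Str.strip (PySem.Str.lower ing)) ing) d).values := by
  induction l generalizing d with
  | nil => rfl
  | cons i l ih =>
    simp only [List.foldl_cons, pvStepSeen]
    have hsc : PySem.Set.contains d.keys (PySem.Str.strip (PySem.Str.lower i)) =
        d.contains (PySem.Str.strip (PySem.Str.lower i)) := by
      rw [Bool.eq_iff_iff]
      simp [PySem.Dict.contains_iff_mem_keys]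
    by_cases h : d.contains (PySem.Str.strip (PySem.Str.lower i)) = true
    · rw [PySem.Dict.setdefault_of_contains d i h]
      simp only [hsc, h, if_true]
      exact ih d
    · have hf : d.contains (PySem.Str.strip (PySem.Str.lower i)) = false := by
        simpa using h
      rw [PySem.Dict.setdefault_of_not_contains d i hf]
      simp only [hsc, hf, if_false, Bool.false_eq_true]
      have hkeys : PySem.Set.add d.keys (PySem.Str.strip (PySem.Str.lower i)) =
          (d.insert (PySem.Str.strip (PySem.Str.lower i)) i).keys := by
        have hmem : PySem.Str.strip (PySem.Str.lower i) ∉ d.keys := by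
          intro hm
          rw [← PySem.Dict.contains_iff_mem_keys] at hm
          rw [hm] at hf
          exact Bool.true_eq_false.mp hf
        rw [PySem.Set.add]
        simp [PySem.Dict.keys_insert_of_not_contains d i hf, hmem]
      have hvals : d.values ++ [i] = (d.insert (PySem.Str.strip (PySem.Str.lower i)) i).values := by
        simp [PySem.Dict.values, PySem.Dict.items_insert_of_not_contains d i hf]
      rw [hkeys, hvals]
      exact ih _

lemma dedup_eq (l : List String) : (l.foldl pvStepSeen (PySem.Set.empty, [])).2 = pvDedup l := by
  have h := dedup_loop l (PySem.Dict.mk ([] : List (String × String)))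
  simpa [PySem.Dict.keys, PySem.Dict.values, PySem.Set.empty, pvDedup] using h

lemma finalize (c1 c2 c3 c4 c5 c6 : List String) :
    (List.foldl (fun d cat => d.insert cat (List.foldl pvStepSeen (PySem.Set.empty, []) (d.getD cat [])).2)
      (PySem.Dict.mk [("Proteins & Meats", c1), ("Dairy & Eggs", c2), ("Grains & Flours", c3), ("Produce", c4), ("Pantry Staples", c5), ("Other", c6)]) (PySem.Dict.mk [("Proteins & Meats", c1), ("Dairy & Eggs", c2), ("Grains & Flours", c3), ("Produce", c4), ("Pantry Staples", c5), ("Other", c6)]).keys).items =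
    [("Proteins & Meats", (c1.foldl pvStepSeen (PySem.Set.empty, [])).2),
     ("Dairy & Eggs", (c2.foldl pvStepSeen (PySem.Set.empty, [])).2),
     ("Grains & Flours", (c3.foldl pvStepSeen (PySem.Set.empty, [])).2),
     ("Produce", (c4.foldl pvStepSeen (PySem.Set.empty, [])).2),
     ("Pantry Staples", (c5.foldl pvStepSeen (PySem.Set.empty, [])).2),
     ("Other", (c6.foldl pvStepSeen (PySem.Set.empty, [])).2)] := rfl

-- ===== VERDICT (by name: the statement is the Claim_ definition above) =====
theorem generate_shopping_list_spec : Claim_equal_generate_shopping_list := by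
  intro recipes _
  unfold Spec_generate_shopping_list generate_shopping_list generate_shopping_list_alt
  simp only [flatten_eq, cat_loop]
  rw [finalize]
  simp only [pvTable, List.map, List.map_cons, List.cons_append, List.nil_append,
    catA_eq_categoryOf, dedup_eq]
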